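-- pv_equiv track=rewrite | github.com/gevaertlab/DUNE | aspects/0_MRI/autoencoder/versions_TB/brainAE_V2.py | computeOuterLinDim
-- ===== SOURCE A (Python) =====
-- def computeOuterLinDim(batchSize, slicePad, convLayerCount, minImageDims, convChannels, convKernelSizes):
--     height = minImageDims[1]
--     width = minImageDims[2]
--     depth = 2*slicePad+1
--     channels = convChannels[0]
--
--     for i in range(0, convLayerCount):
--         depth = (depth - convKernelSizes[2])+1
--         height = (height - convKernelSizes[0])+1
--         width = (width - convKernelSizes[1])+1
--         channels = convChannels[i+1]
--     return depth*height*width*channels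
-- ===== SOURCE B (Python) =====
-- def computeOuterLinDim(batchSize, slicePad, convLayerCount, minImageDims, convChannels, convKernelSizes):
--     # A stack of n valid convolutions shrinks each spatial dimension by n*(kernel-1),
--     # so the final shape follows in O(1) from the inputs.
--     height = minImageDims[1] - convLayerCount * (convKernelSizes[0] - 1)
--     width = minImageDims[2] - convLayerCount * (convKernelSizes[1] - 1)
--     depth = 2*slicePad + 1 - convLayerCount * (convKernelSizes[2] - 1)
--     return depth * height * width * convChannels[convLayerCount]
-- ===== Notes on version B (the rewrite author's own statement) =====
-- stated objective: simpler
-- what changed: Replaces the per-layer loop by closed-form arithmetic (each spatial dimension shrinks by convLayerCount*(kernel-1), channels read once at convChannels[convLayerCount]); Pre_ restricts to the natural domain (nonnegative layer count, at least 3 image dims and kernel sizes, convLayerCount+1 channels), since outside it A's values rest on accidents (a negative count silently skips the loop; with count 0 A never reads the kernel list).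
-- outside the precondition, e.g. on computeOuterLinDim(0, 1, -2, [4, 10, 12], [1, 8, 16], [3, 3, 3]): A returns 360, B returns 12544; on computeOuterLinDim(0, 1, 0, [4, 10, 12], [5], []): A returns 1800, B raises IndexError
import Mathlib
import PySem

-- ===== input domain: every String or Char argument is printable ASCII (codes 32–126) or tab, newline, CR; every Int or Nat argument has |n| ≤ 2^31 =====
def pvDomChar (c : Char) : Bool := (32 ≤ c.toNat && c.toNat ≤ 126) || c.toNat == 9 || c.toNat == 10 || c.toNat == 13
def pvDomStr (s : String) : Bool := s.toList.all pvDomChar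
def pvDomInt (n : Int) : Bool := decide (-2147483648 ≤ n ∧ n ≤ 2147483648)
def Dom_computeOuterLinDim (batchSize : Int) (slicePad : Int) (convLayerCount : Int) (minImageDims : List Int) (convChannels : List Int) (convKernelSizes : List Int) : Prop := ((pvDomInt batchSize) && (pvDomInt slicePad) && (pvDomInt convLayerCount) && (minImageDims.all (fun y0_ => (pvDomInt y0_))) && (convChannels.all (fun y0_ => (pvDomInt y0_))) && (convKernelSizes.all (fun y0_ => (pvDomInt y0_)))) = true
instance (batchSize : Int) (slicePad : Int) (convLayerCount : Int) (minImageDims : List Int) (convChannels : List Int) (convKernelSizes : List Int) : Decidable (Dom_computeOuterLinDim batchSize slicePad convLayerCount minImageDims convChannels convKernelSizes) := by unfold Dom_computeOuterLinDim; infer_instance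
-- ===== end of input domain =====

-- B replaces A's per-layer loop by closed-form arithmetic (simpler: no loop, no running state).

-- ===== PORT A =====
-- literal port of A's loop: state (depth, height, width, channels) folded over range(0, convLayerCount)
def computeOuterLinDim (batchSize : Int) (slicePad : Int) (convLayerCount : Int) (minImageDims : List Int) (convChannels : List Int) (convKernelSizes : List Int) : Int :=
  let height := PySem.List.pyGetD minImageDims 1 0
  let width := PySem.List.pyGetD minImageDims 2 0
  let depth := 2*slicePad+1
  let channels := PySem.List.pyGetD convChannels 0 0
  let st := (PySem.List.pyRange 0 convLayerCount 1).foldl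
    (fun (st : Int × Int × Int × Int) i =>
      ((st.1 - PySem.List.pyGetD convKernelSizes 2 0) + 1,
       (st.2.1 - PySem.List.pyGetD convKernelSizes 0 0) + 1,
       (st.2.2.1 - PySem.List.pyGetD convKernelSizes 1 0) + 1,
       PySem.List.pyGetD convChannels (i+1) 0))
    (depth, height, width, channels)
  st.1 * st.2.1 * st.2.2.1 * st.2.2.2

-- ===== PORT B =====
-- literal port of Source B: closed form, no loop
def computeOuterLinDim_alt (batchSize : Int) (slicePad : Int) (convLayerCount : Int) (minImageDims : List Int) (convChannels : List Int) (convKernelSizes : List Int) : Int :=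
  let height := PySem.List.pyGetD minImageDims 1 0 - convLayerCount * (PySem.List.pyGetD convKernelSizes 0 0 - 1)
  let width := PySem.List.pyGetD minImageDims 2 0 - convLayerCount * (PySem.List.pyGetD convKernelSizes 1 0 - 1)
  let depth := 2*slicePad + 1 - convLayerCount * (PySem.List.pyGetD convKernelSizes 2 0 - 1)
  depth * height * width * PySem.List.pyGetD convChannels convLayerCount 0

-- ===== PRECONDITION & SPEC =====
-- Pre_ restricts to the function's natural domain: a nonnegative layer count, at least 3 image
-- dimensions and 3 kernel sizes, and a channel count per layer boundary (convLayerCount+1 entries).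
-- Outside it A either raises IndexError or returns values resting on accidents of its
-- implementation (a negative count silently skips the loop; with count 0 the kernel list is never read).
def Pre_computeOuterLinDim (batchSize : Int) (slicePad : Int) (convLayerCount : Int) (minImageDims : List Int) (convChannels : List Int) (convKernelSizes : List Int) : Prop :=
  0 ≤ convLayerCount ∧ 3 ≤ minImageDims.length ∧ 3 ≤ convKernelSizes.length ∧
  convLayerCount + 1 ≤ (convChannels.length : Int)
instance (batchSize : Int) (slicePad : Int) (convLayerCount : Int) (minImageDims : List Int) (convChannels : List Int) (convKernelSizes : List Int) : Decidable (Pre_computeOuterLinDim batchSize slicePad convLayerCount minImageDims convChannels convKernelSizes) := by unfold Pre_computeOuterLinDim; infer_instance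
def pvWitness_computeOuterLinDim : Int × Int × Int × List Int × List Int × List Int := (1, 1, 2, [4, 10, 12], [1, 8, 16], [3, 3, 3])
def Spec_computeOuterLinDim (batchSize : Int) (slicePad : Int) (convLayerCount : Int) (minImageDims : List Int) (convChannels : List Int) (convKernelSizes : List Int) (out : Int) : Prop := out = computeOuterLinDim_alt batchSize slicePad convLayerCount minImageDims convChannels convKernelSizes
instance (batchSize : Int) (slicePad : Int) (convLayerCount : Int) (minImageDims : List Int) (convChannels : List Int) (convKernelSizes : List Int) (out : Int) : Decidable (Spec_computeOuterLinDim batchSize slicePad convLayerCount minImageDims convChannels convKernelSizes out) := by unfold Spec_computeOuterLinDim; infer_instance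

-- ===== CLAIM (what is proved, stated in full; the proofs are below) =====
def Claim_equal_computeOuterLinDim : Prop := ∀ (batchSize : Int) (slicePad : Int) (convLayerCount : Int) (minImageDims : List Int) (convChannels : List Int) (convKernelSizes : List Int), Dom_computeOuterLinDim batchSize slicePad convLayerCount minImageDims convChannels convKernelSizes → Pre_computeOuterLinDim batchSize slicePad convLayerCount minImageDims convChannels convKernelSizes → Spec_computeOuterLinDim batchSize slicePad convLayerCount minImageDims convChannels convKernelSizes (computeOuterLinDim batchSize slicePad convLayerCount minImageDims convChannels convKernelSizes)

-- ===== LEMMAS AND PROOFS =====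

-- Closed form of A's fold over range(0, n) for a natural n.
theorem pvFold_closed (cc ks : List Int) (n : Nat) (d h w c : Int) :
    (PySem.List.pyRange 0 (n : Int) 1).foldl
      (fun (st : Int × Int × Int × Int) i =>
        ((st.1 - PySem.List.pyGetD ks 2 0) + 1,
         (st.2.1 - PySem.List.pyGetD ks 0 0) + 1,
         (st.2.2.1 - PySem.List.pyGetD ks 1 0) + 1,
         PySem.List.pyGetD cc (i+1) 0))
      (d, h, w, c)
    = (d - n * (PySem.List.pyGetD ks 2 0 - 1),
       h - n * (PySem.List.pyGetD ks 0 0 - 1),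
       w - n * (PySem.List.pyGetD ks 1 0 - 1),
       if n = 0 then c else PySem.List.pyGetD cc (n : Int) 0) := by
  induction n with
  | zero => simp
  | succ m ih =>
      have h0 : (0 : Int) ≤ (m : Int) := Int.natCast_nonneg m
      have hc : ((m + 1 : Nat) : Int) = (m : Int) + 1 := by push_cast; ring
      rw [hc, PySem.List.pyRange_one_succ_right h0, List.foldl_append, ih,
        List.foldl_cons, List.foldl_nil]
      refine Prod.ext ?_ (Prod.ext ?_ (Prod.ext ?_ ?_))
      · simp; ring
      · simp; ring
      · simp; ring
      · simp

-- ===== VERDICT (by name: the statement is the Claim_ definition above) =====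
theorem computeOuterLinDim_spec : Claim_equal_computeOuterLinDim := by
  intro batchSize slicePad convLayerCount minImageDims convChannels convKernelSizes _hd hp
  obtain ⟨hn0, _, _, _⟩ := hp
  unfold Spec_computeOuterLinDim computeOuterLinDim computeOuterLinDim_alt
  dsimp only
  have hn : convLayerCount = ((convLayerCount.toNat : Nat) : Int) := by omega
  rw [hn, pvFold_closed]
  by_cases h0 : convLayerCount.toNat = 0
  · simp [h0]
  · simp only [if_neg h0]
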